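-- pv_equiv track=rewrite | github.com/DaToiletClogger/core-cribbage | app.py | score_engine
-- ===== SOURCE A (Python) =====
-- import itertools
--
-- def score_engine(kept, cut, is_crib):
--     cards = kept + [cut]
--     ranks = [c[0] for c in cards]
--     vals = [min(r, 10) for r in ranks]
--     pts = 0
--
--     # 15s
--     for i in range(2, len(cards) + 1):
--         for combo in itertools.combinations(vals, i):
--             if sum(combo) == 15: pts += 2
--
--     # Pairs
--     for a, b in itertools.combinations(ranks, 2):
--         if a == b: pts += 2
--
--     # Runs
--     unique_ranks = sorted(list(set(ranks)))
--     run_pts = 0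
--     for length in range(5, 2, -1):
--         for i in range(len(unique_ranks) - length + 1):
--             sub = unique_ranks[i:i+length]
--             if sub[-1] - sub[0] == length - 1:
--                 mult = 1
--                 for r in sub: mult *= ranks.count(r)
--                 run_pts = length * mult
--                 break
--         if run_pts > 0: break
--     pts += run_pts
--
--     # Flush
--     if len(kept) == 4:
--         kept_suits = set([c[1] for c in kept])
--         if len(kept_suits) == 1:
--             if list(kept_suits)[0] == cut[1]: pts += 5
--             elif not is_crib: pts += 4
--
--     # Nobs
--     for c in kept:
--         if c[0] == 11 and c[1] == cut[1]: pts += 1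
--
--     return pts
-- ===== SOURCE B (Python) =====
-- def score_engine(kept, cut, is_crib):
--     cards = kept + [cut]
--     ranks = [c[0] for c in cards]
--     vals = [min(r, 10) for r in ranks]
--     pts = 0
--
--     # 15s: recursive subset count over the card values; a subset hitting 15
--     # always has >= 2 cards since every value is at most 10.
--     def subsets15(i, s):
--         if i == len(vals):
--             return 1 if s == 15 else 0
--         return subsets15(i + 1, s) + subsets15(i + 1, s + vals[i])
--     pts += 2 * subsets15(0, 0)
--
--     # Pairs: single pass with a running counter; each card pairs with every
--     # equal rank already seen.  'seen' ends up as the full rank counter.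
--     seen = {}
--     for r in ranks:
--         pts += 2 * seen.get(r, 0)
--         seen[r] = seen.get(r, 0) + 1
--
--     # Runs: split the sorted distinct ranks into maximal consecutive streaks.
--     def streaks(ur):
--         if not ur:
--             return []
--         ss = streaks(ur[1:])
--         if ss and ss[0][0] == ur[0] + 1:
--             return [[ur[0]] + ss[0]] + ss[1:]
--         return [[ur[0]]] + ss
--     ss = streaks(sorted(set(ranks)))
--     best = 0
--     for s in ss:
--         best = max(best, len(s))
--     run_len = min(best, 5)
--     if run_len >= 3:
--         streak = next(s for s in ss if len(s) >= run_len)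
--         mult = 1
--         for r in streak[:run_len]:
--             mult *= seen[r]
--         pts += run_len * mult
--
--     # Flush
--     if len(kept) == 4 and all(c[1] == kept[0][1] for c in kept):
--         if kept[0][1] == cut[1]:
--             pts += 5
--         elif not is_crib:
--             pts += 4
--
--     # Nobs
--     pts += sum(1 for c in kept if c[0] == 11 and c[1] == cut[1])
--     return pts
-- ===== Notes on version B (the rewrite author's own statement) =====
-- stated objective: alternative
-- what changed: Fifteens are counted by a recursive subset-sum count instead of enumerating itertools.combinations per size, pairs by a one-pass running counter instead of all 2-combinations, and runs by splitting the sorted distinct ranks into maximal consecutive streaks instead of the 5/4/3 sliding-window loops with breaks; flush uses an all() check on the first suit instead of building a set.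
import Mathlib
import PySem

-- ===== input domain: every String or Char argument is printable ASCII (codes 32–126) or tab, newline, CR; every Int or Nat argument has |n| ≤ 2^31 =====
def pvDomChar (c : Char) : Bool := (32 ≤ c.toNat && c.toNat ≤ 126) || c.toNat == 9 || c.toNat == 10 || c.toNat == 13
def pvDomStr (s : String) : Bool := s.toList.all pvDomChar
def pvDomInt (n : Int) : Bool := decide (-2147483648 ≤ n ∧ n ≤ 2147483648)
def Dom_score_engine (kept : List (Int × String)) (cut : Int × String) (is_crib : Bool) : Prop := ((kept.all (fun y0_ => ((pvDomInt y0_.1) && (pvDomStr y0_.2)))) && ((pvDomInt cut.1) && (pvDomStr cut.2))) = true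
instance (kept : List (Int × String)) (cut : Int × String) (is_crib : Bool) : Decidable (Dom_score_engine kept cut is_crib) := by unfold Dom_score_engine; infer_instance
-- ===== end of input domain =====

-- B replaces the per-size combinations enumeration for 15s by a recursive subset-sum count,
-- the 2-combinations pair loop by a one-pass running counter, and the 5/4/3 sliding-window
-- run search by a maximal-consecutive-streak decomposition of the sorted distinct ranks.

-- ===== PORT A =====
def score_engine (kept : List (Int × String)) (cut : Int × String) (is_crib : Bool) : Int :=
  let cards := kept ++ [cut]
  let ranks := cards.map (fun c => c.1)
  let vals := ranks.map (fun r => min r 10)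
  let pts : Int := 0
  -- 15s
  let pts := (PySem.List.pyRange 2 ((cards.length : Int) + 1) 1).foldl (fun pts i =>
      (PySem.List.combinations vals i.toNat).foldl (fun pts combo =>
        if combo.sum = 15 then pts + 2 else pts) pts) pts
  -- Pairs
  let pts := (PySem.List.combinations ranks 2).foldl (fun pts ab =>
      match ab with
      | [a, b] => if a = b then pts + 2 else pts
      | _ => pts) pts
  -- Runs ('break' is ported as a freeze guard; run_pts, once set, is never 0)
  let unique_ranks := PySem.List.sorted (PySem.Set.ofList ranks) (fun x => x) false
  let run_pts := (PySem.List.pyRange 5 2 (-1)).foldl (fun rp length =>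
      if rp > 0 then rp else
        (PySem.List.pyRange 0 ((unique_ranks.length : Int) - length + 1) 1).foldl (fun rp i =>
          if rp ≠ 0 then rp else
            let sub := PySem.List.slice unique_ranks (some i) (some (i + length))
            -- sub[-1] / sub[0]: sub is a nonempty window here, so pyGetD with default 0 is exact
            if PySem.List.pyGetD sub (-1) 0 - PySem.List.pyGetD sub 0 0 = length - 1 then
              length * sub.foldl (fun mult r => mult * (ranks.count r : Int)) 1
            else rp) rp) 0
  let pts := pts + run_pts
  -- Flush (list(kept_suits)[0]: the set is a singleton here, so hash order is irrelevant)
  let pts :=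
    if kept.length = 4 then
      let kept_suits := PySem.Set.ofList (kept.map (fun c => c.2))
      if kept_suits.length = 1 then
        if PySem.List.pyGetD kept_suits 0 "" = cut.2 then pts + 5
        else if !is_crib then pts + 4 else pts
      else pts
    else pts
  -- Nobs
  kept.foldl (fun pts c => if c.1 = 11 ∧ c.2 = cut.2 then pts + 1 else pts) pts

-- ===== PORT B =====
def pvSubsets15 : List Int → Int → Int
  | [], s => if s = 15 then 1 else 0
  | v :: rest, s => pvSubsets15 rest s + pvSubsets15 rest (s + v)

def pvStreaks : List Int → List (List Int)
  | [] => []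
  | r :: rest =>
    match pvStreaks rest with
    | [] => [[r]]
    | s :: ss => if s.head? = some (r + 1) then (r :: s) :: ss else [r] :: s :: ss

def score_engine_alt (kept : List (Int × String)) (cut : Int × String) (is_crib : Bool) : Int :=
  let cards := kept ++ [cut]
  let ranks := cards.map (fun c => c.1)
  let vals := ranks.map (fun r => min r 10)
  let pts : Int := 0
  -- 15s
  let pts := pts + 2 * pvSubsets15 vals 0
  -- Pairs (seen ends up as the full rank counter, reused below; seen[r] is total, r is always a key)
  let sp := ranks.foldl (fun (sp : PySem.Dict Int Int × Int) r =>
      (sp.1.insert r (sp.1.getD r 0 + 1), sp.2 + 2 * sp.1.getD r 0)) (PySem.Dict.empty, pts)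
  let seen := sp.1
  let pts := sp.2
  -- Runs (next(...) always succeeds here, so the getD [] default is never used)
  let ss := pvStreaks (PySem.List.sorted (PySem.Set.ofList ranks) (fun x => x) false)
  let best := ss.foldl (fun best s => max best (s.length : Int)) 0
  let run_len := min best 5
  let pts :=
    if 3 ≤ run_len then
      let streak := (ss.find? (fun s => decide (run_len ≤ (s.length : Int)))).getD []
      let mult := (PySem.List.slice streak none (some run_len)).foldl
          (fun mult r => mult * seen.getD r 0) 1
      pts + run_len * mult
    else pts
  -- Flush (kept[0] is only read under the len(kept) == 4 short-circuit)
  let pts :=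
    match kept with
    | [] => pts
    | c0 :: _ =>
      if kept.length = 4 ∧ kept.all (fun c => decide (c.2 = c0.2)) then
        if c0.2 = cut.2 then pts + 5
        else if !is_crib then pts + 4 else pts
      else pts
  -- Nobs
  pts + (kept.countP (fun c => decide (c.1 = 11 ∧ c.2 = cut.2)) : Int)

-- ===== PRECONDITION & SPEC =====
def Spec_score_engine (kept : List (Int × String)) (cut : Int × String) (is_crib : Bool) (out : Int) : Prop := out = score_engine_alt kept cut is_crib
instance (kept : List (Int × String)) (cut : Int × String) (is_crib : Bool) (out : Int) : Decidable (Spec_score_engine kept cut is_crib out) := by unfold Spec_score_engine; infer_instance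

-- ===== CLAIM (what is proved, stated in full; the proofs are below) =====
def Claim_equal_score_engine : Prop := ∀ (kept : List (Int × String)) (cut : Int × String) (is_crib : Bool), Dom_score_engine kept cut is_crib → Spec_score_engine kept cut is_crib (score_engine kept cut is_crib)


-- ===== LEMMAS AND PROOFS =====

-- A's pair count: for each element, the number of equal elements after it.
def pvPA : List Int → Int
  | [] => 0
  | r :: t => (t.count r : Int) + pvPA t

-- B's running pair count, parametrised by the counter so far.
def pvV (d : PySem.Dict Int Int) : List Int → Int
  | [] => 0
  | r :: t => d.getD r 0 + pvV (d.insert r (d.getD r 0 + 1)) t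

-- maximal consecutive prefix of a list (proof-side view of pvStreaks)
def pvCPre : List Int → List Int
  | [] => []
  | [a] => [a]
  | a :: b :: t => if b = a + 1 then a :: pvCPre (b :: t) else [a]

-- first length-L window of ur satisfying A's run condition, as the window itself
def pvFirstRun (L : Nat) : List Int → Option (List Int)
  | [] => none
  | x :: rest =>
    if L ≤ (x :: rest).length then
      if PySem.List.pyGetD ((x :: rest).take L) (-1) 0
           - PySem.List.pyGetD ((x :: rest).take L) 0 0 = (L : Int) - 1 then
        some ((x :: rest).take L)
      else pvFirstRun L rest
    else none

-- count of size-r combinations whose sum together with s reaches 15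
def pvCnt (l : List Int) (s : Int) (r : Nat) : Int :=
  ((PySem.List.combinations l r).countP (fun c => decide (c.sum + s = 15)) : Int)

lemma pvCnt_zero (l : List Int) (s : Int) : pvCnt l s 0 = if s = 15 then 1 else 0 := by
  unfold pvCnt
  rw [PySem.List.combinations_zero]
  by_cases h : s = 15 <;> simp [h]

lemma pvCnt_succ (v : Int) (t : List Int) (s : Int) (r : Nat) :
    pvCnt (v :: t) s (r + 1) = pvCnt t (s + v) r + pvCnt t s (r + 1) := by
  unfold pvCnt
  rw [PySem.List.combinations_cons_succ, List.countP_append, List.countP_map]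
  have : ((fun c : List Int => decide (c.sum + s = 15)) ∘ (v :: ·))
      = fun c : List Int => decide (c.sum + (s + v) = 15) := by
    funext c
    simp only [Function.comp, List.sum_cons]
    exact decide_eq_decide.mpr (by omega)
  rw [this]
  push_cast
  ring

lemma pvCnt_top (t : List Int) (s : Int) : pvCnt t s (t.length + 1) = 0 := by
  unfold pvCnt
  rw [PySem.List.combinations_eq_nil_of_length_lt (xs := t) (r := t.length + 1) (by omega)]
  simp

lemma subsets15_sum (l : List Int) : ∀ s : Int,
    ((List.range (l.length + 1)).map (pvCnt l s)).sum = pvSubsets15 l s := by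
  induction l with
  | nil =>
    intro s
    simp [pvCnt_zero, pvSubsets15]
  | cons v t ih =>
    intro s
    have e2 : ∀ (g : Nat → Int) (n : Nat), ((List.range (n + 1)).map g).sum
        = g 0 + ((List.range n).map (fun r => g (r + 1))).sum := by
      intro g n
      rw [List.range_succ_eq_map, List.map_cons, List.sum_cons, List.map_map]
      rfl
    rw [List.length_cons, e2 (pvCnt (v :: t) s) (t.length + 1)]
    have hsucc : ((List.range (t.length + 1)).map (fun r => pvCnt (v :: t) s (r + 1))).sum
        = ((List.range (t.length + 1)).map (pvCnt t (s + v))).sum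
          + ((List.range (t.length + 1)).map (fun r => pvCnt t s (r + 1))).sum := by
      calc ((List.range (t.length + 1)).map (fun r => pvCnt (v :: t) s (r + 1))).sum
          = ((List.range (t.length + 1)).map
              (fun r => pvCnt t (s + v) r + pvCnt t s (r + 1))).sum := by
            apply congrArg
            apply List.map_congr_left
            intro r _
            exact pvCnt_succ v t s r
        _ = _ := by
            rw [← List.sum_map_add]
    have htail : ((List.range (t.length + 1)).map (fun r => pvCnt t s (r + 1))).sum
        = pvSubsets15 t s - pvCnt t s 0 + pvCnt t s (t.length + 1) := by
      have e1 : ((List.range (t.length + 1 + 1)).map (pvCnt t s)).sum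
          = ((List.range (t.length + 1)).map (pvCnt t s)).sum + pvCnt t s (t.length + 1) := by
        rw [List.range_succ, List.map_append, List.sum_append]
        simp
      have e2' := e2 (pvCnt t s) (t.length + 1)
      rw [ih s] at e1
      omega
    rw [hsucc, htail, pvCnt_top, ih (s + v)]
    simp only [pvCnt_zero]
    rw [pvSubsets15]
    ring

lemma fold_if_two (l : List (List Int)) (a : Int) :
    l.foldl (fun acc c => if c.sum = 15 then acc + 2 else acc) a
      = a + 2 * (l.countP (fun c => decide (c.sum + 0 = 15)) : Int) := by
  induction l generalizing a with
  | nil => simp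
  | cons c t ih =>
    rw [List.foldl_cons, ih, List.countP_cons]
    by_cases h : c.sum = 15 <;> simp [h] <;> push_cast <;> ring

lemma pvCnt_one (l : List Int) (h10 : ∀ v ∈ l, v ≤ 10) : pvCnt l 0 1 = 0 := by
  unfold pvCnt
  rw [PySem.List.combinations_one, List.countP_map]
  have : l.countP ((fun c : List Int => decide (c.sum + 0 = 15)) ∘ (fun x => [x])) = 0 := by
    rw [List.countP_eq_zero]
    intro v hv
    have := h10 v hv
    simp only [Function.comp, List.sum_cons, List.sum_nil, decide_eq_true_eq]
    omega
  rw [this]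
  rfl

lemma stage15 (l : List Int) (h10 : ∀ v ∈ l, v ≤ 10) (pts : Int) :
    (PySem.List.pyRange 2 ((l.length : Int) + 1) 1).foldl (fun pts i =>
      (PySem.List.combinations l i.toNat).foldl (fun pts combo =>
        if combo.sum = 15 then pts + 2 else pts) pts) pts = pts + 2 * pvSubsets15 l 0 := by
  cases l with
  | nil =>
    rw [PySem.List.pyRange_one_eq_nil (by norm_num)]
    simp [pvSubsets15]
  | cons v t =>
    rw [PySem.List.pyRange_one]
    have hT : ((((v :: t).length : Int) + 1) - 2).toNat = t.length := by
      simp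
      omega
    rw [hT, List.foldl_map]
    rw [PySem.List.foldl_congr_mem (List.range t.length)
      (fun x y => (PySem.List.combinations (v :: t) ((2 : Int) + (y : Int)).toNat).foldl
        (fun pts combo => if combo.sum = 15 then pts + 2 else pts) x)
      (fun (pts : Int) (k : Nat) => pts + 2 * pvCnt (v :: t) 0 (k + 2)) pts
      (by
        intro acc k _
        simp only []
        have htn : ((2 : Int) + (k : Int)).toNat = k + 2 := by omega
        rw [htn, fold_if_two]
        rfl)]
    rw [PySem.List.foldl_add (g := fun k : Nat => 2 * pvCnt (v :: t) 0 (k + 2))]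
    have hsum : ((List.range t.length).map (fun k => pvCnt (v :: t) 0 (k + 2))).sum
        = pvSubsets15 (v :: t) 0 := by
      have e2 : ∀ (g : Nat → Int) (n : Nat), ((List.range (n + 1)).map g).sum
          = g 0 + ((List.range n).map (fun r => g (r + 1))).sum := by
        intro g n
        rw [List.range_succ_eq_map, List.map_cons, List.sum_cons, List.map_map]
        rfl
      have h := subsets15_sum (v :: t) 0
      rw [List.length_cons, e2 (pvCnt (v :: t) 0) (t.length + 1),
        e2 (fun r => pvCnt (v :: t) 0 (r + 1)) t.length] at h
      have hz : pvCnt (v :: t) 0 0 = 0 := by rw [pvCnt_zero]; norm_num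
      have ho : pvCnt (v :: t) 0 (0 + 1) = 0 := pvCnt_one (v :: t) h10
      rw [hz, ho] at h
      simpa using h
    have hmul : ((List.range t.length).map (fun k => 2 * pvCnt (v :: t) 0 (k + 2))).sum
        = 2 * ((List.range t.length).map (fun k => pvCnt (v :: t) 0 (k + 2))).sum := by
      induction (List.range t.length) with
      | nil => simp
      | cons a u ihu => simp only [List.map_cons, List.sum_cons, ihu]; ring
    rw [hmul, hsum]

lemma fold_eq_count (r : Int) (t : List Int) (pts : Int) :
    t.foldl (fun pts x => if r = x then pts + 2 else pts) pts = pts + 2 * (t.count r : Int) := by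
  induction t generalizing pts with
  | nil => simp
  | cons y u ihy =>
    rw [List.foldl_cons]
    by_cases h : r = y
    · rw [if_pos h, ihy, List.count_cons]
      simp [h]
      push_cast; ring
    · rw [if_neg h, ihy, List.count_cons]
      have hbe : (r == y) = false := by simp [h]
      simp [hbe]
      omega

lemma stagePairsA (l : List Int) (pts : Int) :
    (PySem.List.combinations l 2).foldl (fun pts ab =>
      match ab with
      | [a, b] => if a = b then pts + 2 else pts
      | _ => pts) pts = pts + 2 * pvPA l := by
  induction l generalizing pts with
  | nil => simp [PySem.List.combinations_nil_succ, pvPA]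
  | cons r t ih =>
    rw [show (2:Nat) = 1 + 1 from rfl, PySem.List.combinations_cons_succ,
        List.foldl_append, PySem.List.combinations_one]
    rw [show (t.map (fun x => [x])).map (r :: ·) = t.map (fun x => [r, x]) from by simp]
    rw [List.foldl_map]
    have hmatch : (fun (pts x : Int) =>
        (match [r, x] with
          | [a, b] => if a = b then pts + 2 else pts
          | _ => pts)) = fun pts x => if r = x then pts + 2 else pts := rfl
    rw [hmatch, fold_eq_count, ih, pvPA]
    ring

lemma counter_snoc (pref : List Int) (r : Int) :
    PySem.Dict.counter (pref ++ [r])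
      = (PySem.Dict.counter pref).insert r ((PySem.Dict.counter pref).getD r 0 + 1) := by
  rw [← PySem.Dict.foldl_insert_getD_add_one_eq_counter, ← PySem.Dict.foldl_insert_getD_add_one_eq_counter,
      List.foldl_append]
  rfl

lemma count_snoc_int (pref : List Int) (r x : Int) :
    ((pref ++ [r]).count x : Int) = (pref.count x : Int) + if x = r then 1 else 0 := by
  rw [List.count_append]
  by_cases h : x = r <;> simp [h, List.count_eq_zero]

lemma sum_count_snoc (t pref : List Int) (r : Int) :
    (t.map (fun x => ((pref ++ [r]).count x : Int))).sum
      = (t.map (fun x => (pref.count x : Int))).sum + (t.count r : Int) := by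
  induction t with
  | nil => simp
  | cons y u ihu =>
    rw [List.map_cons, List.sum_cons, ihu, count_snoc_int, List.map_cons, List.sum_cons,
      List.count_cons]
    by_cases h : y = r
    · subst h
      simp
      push_cast
      ring
    · have hbe : (y == r) = false := beq_eq_false_iff_ne.mpr h
      rw [if_neg h, hbe]
      simp
      ring

lemma V_counter (l : List Int) : ∀ (pref : List Int),
    pvV (PySem.Dict.counter pref) l = ((l.map (fun x => (pref.count x : Int))).sum) + pvPA l := by
  induction l with
  | nil => simp [pvV, pvPA]
  | cons r t ih =>
    intro pref
    rw [pvV, ← counter_snoc, ih (pref ++ [r]), PySem.Dict.getD_counter, sum_count_snoc]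
    rw [List.map_cons, List.sum_cons, pvPA]
    push_cast
    ring

lemma stagePairsB (l : List Int) (pts : Int) :
    l.foldl (fun (sp : PySem.Dict Int Int × Int) r =>
      (sp.1.insert r (sp.1.getD r 0 + 1), sp.2 + 2 * sp.1.getD r 0)) (PySem.Dict.empty, pts)
    = (PySem.Dict.counter l, pts + 2 * pvPA l) := by
  have key : ∀ (l : List Int) (d : PySem.Dict Int Int) (pts : Int),
      l.foldl (fun (sp : PySem.Dict Int Int × Int) r =>
        (sp.1.insert r (sp.1.getD r 0 + 1), sp.2 + 2 * sp.1.getD r 0)) (d, pts)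
      = (l.foldl (fun d r => d.insert r (d.getD r 0 + 1)) d, pts + 2 * pvV d l) := by
    intro l
    induction l with
    | nil => intro d pts; simp [pvV]
    | cons r t ih => intro d pts; rw [List.foldl_cons, List.foldl_cons, ih, pvV]; ring_nf
  rw [key, PySem.Dict.foldl_insert_getD_add_one_eq_counter]
  have : pvV PySem.Dict.empty l = pvPA l := by
    have h0 : PySem.Dict.empty = PySem.Dict.counter ([] : List Int) := rfl
    rw [h0, V_counter]
    simp
  rw [this]

lemma pyGetD_zero' (l : List Int) (d : Int) (h : l ≠ []) :
    PySem.List.pyGetD l 0 d = l.head?.getD d := by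
  cases l with
  | nil => simp at h
  | cons a t => simp [pysem]

lemma pyGetD_neg_one' (l : List Int) (d : Int) (h : l ≠ []) :
    PySem.List.pyGetD l (-1) d = l.getLast?.getD d := by
  cases l with
  | nil => simp at h
  | cons a t =>
    simp [pysem]
    rw [List.getLast?_eq_getElem?]
    simp
    rfl

lemma pvFirstRun_unfold (L : Nat) (ur : List Int) (h : ur ≠ []) :
    pvFirstRun L ur = if L ≤ ur.length then
      (if PySem.List.pyGetD (ur.take L) (-1) 0
            - PySem.List.pyGetD (ur.take L) 0 0 = (L : Int) - 1 then
        some (ur.take L)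
      else pvFirstRun L ur.tail)
    else none := by
  cases ur with
  | nil => simp at h
  | cons x rest => rfl

lemma pvFirstRun_none_of_lt (L : Nat) (ur : List Int) (h : ur.length < L) :
    pvFirstRun L ur = none := by
  cases ur with
  | nil => rfl
  | cons x rest => rw [pvFirstRun_unfold _ _ (by simp), if_neg (by omega)]

lemma chain_last (t : List Int) : ∀ x : Int, List.IsChain (fun a b => b = a + 1) (x :: t) →
    (x :: t).getLast?.getD 0 = x + (t.length : Int) := by
  induction t with
  | nil => intro x _; simp
  | cons y u ih =>
    intro x hch
    rw [List.isChain_cons_cons] at hch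
    rw [List.getLast?_cons_cons]
    rw [ih y hch.2, hch.1]
    simp only [List.length_cons]
    push_cast
    omega

lemma last_ge (t : List Int) : ∀ x : Int, (x :: t).Pairwise (· < ·) →
    x + (t.length : Int) ≤ (x :: t).getLast?.getD 0 := by
  induction t with
  | nil => intro x _; simp
  | cons y u ih =>
    intro x hp
    rw [List.getLast?_cons_cons]
    have hy := ih y (List.Pairwise.of_cons hp)
    have hxy : x < y := (List.pairwise_cons.mp hp).1 y (by simp)
    simp only [List.length_cons]
    push_cast
    omega

lemma chain_of_last (t : List Int) : ∀ x : Int, (x :: t).Pairwise (· < ·) →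
    (x :: t).getLast?.getD 0 = x + (t.length : Int) →
    List.IsChain (fun a b => b = a + 1) (x :: t) := by
  induction t with
  | nil => intro x _ _; simp
  | cons y u ih =>
    intro x hp hlast
    rw [List.getLast?_cons_cons] at hlast
    have hy := last_ge u y (List.Pairwise.of_cons hp)
    have hxy : x < y := (List.pairwise_cons.mp hp).1 y (by simp)
    simp only [List.length_cons] at hlast
    have hyx : y = x + 1 := by push_cast at hlast ⊢; omega
    rw [List.isChain_cons_cons]
    refine ⟨hyx, ih y (List.Pairwise.of_cons hp) ?_⟩
    push_cast at hlast ⊢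
    omega

lemma pvCPre_head (x : Int) (u : List Int) : (pvCPre (x :: u)).head? = some x := by
  cases u with
  | nil => rfl
  | cons b t =>
    rw [pvCPre]
    split <;> rfl

lemma pvCPre_ne_nil (x : Int) (u : List Int) : pvCPre (x :: u) ≠ [] := by
  cases u with
  | nil => simp [pvCPre]
  | cons b t =>
    rw [pvCPre]
    split <;> simp

lemma pvCPre_chain (l : List Int) : List.IsChain (fun a b => b = a + 1) (pvCPre l) := by
  induction l using pvCPre.induct with
  | case1 => simp [pvCPre]
  | case2 a => simp [pvCPre]
  | case3 a t ih =>
    rw [pvCPre, if_pos rfl]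
    cases hc : pvCPre ((a + 1) :: t) with
    | nil => exact absurd hc (pvCPre_ne_nil (a + 1) t)
    | cons y s =>
      have hy : y = a + 1 := by
        have := pvCPre_head (a + 1) t
        rw [hc] at this
        simpa using this
      rw [List.isChain_cons_cons]
      rw [hc] at ih
      exact ⟨hy, ih⟩
  | case4 a b t h =>
    rw [pvCPre, if_neg h]
    simp

lemma pvCPre_append_drop (l : List Int) : pvCPre l ++ l.drop (pvCPre l).length = l := by
  induction l using pvCPre.induct with
  | case1 => rfl
  | case2 a => rfl
  | case3 a t ih =>
    rw [pvCPre, if_pos rfl]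
    simp only [List.length_cons, List.cons_append, List.drop_succ_cons]
    rw [ih]
  | case4 a b t h =>
    rw [pvCPre, if_neg h]
    simp

lemma pvCPre_gap (l : List Int) : ∀ e h', (pvCPre l).getLast? = some e →
    (l.drop (pvCPre l).length).head? = some h' → h' ≠ e + 1 := by
  induction l using pvCPre.induct with
  | case1 => intro e h' he _; simp [pvCPre] at he
  | case2 a => intro e h' _ hh; simp [pvCPre] at hh
  | case3 a t ih =>
    intro e h' he hh
    rw [pvCPre, if_pos rfl] at he hh
    simp only [List.length_cons, List.drop_succ_cons] at hh
    cases hc : pvCPre ((a + 1) :: t) with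
    | nil => exact absurd hc (pvCPre_ne_nil _ _)
    | cons y s =>
      rw [hc, List.getLast?_cons_cons] at he
      rw [hc] at hh
      exact ih e h' (by rw [hc]; exact he) (by rw [hc]; exact hh)
  | case4 a b t h =>
    intro e h' he hh
    rw [pvCPre, if_neg h] at he hh
    simp at he hh
    rw [← he, ← hh]
    exact h
  
lemma pvStreaks_first (x : Int) (u : List Int) :
    ∃ s ss, pvStreaks (x :: u) = s :: ss ∧ s.head? = some x := by
  rw [pvStreaks]
  cases hu : pvStreaks u with
  | nil => exact ⟨[x], [], rfl, rfl⟩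
  | cons s ss =>
    by_cases hc : s.head? = some (x + 1)
    · exact ⟨x :: s, ss, by dsimp only; rw [if_pos hc], rfl⟩
    · exact ⟨[x], s :: ss, by dsimp only; rw [if_neg hc], rfl⟩

lemma streaks_append (s : List Int) : ∀ (rest : List Int), s ≠ [] →
    List.IsChain (fun a b => b = a + 1) s →
    (∀ h', rest.head? = some h' → h' ≠ s.getLast?.getD 0 + 1) →
    pvStreaks (s ++ rest) = s :: pvStreaks rest := by
  induction s with
  | nil => intro _ h; simp at h
  | cons x s' ih =>
    intro rest _ hch hgap
    cases s' with
    | nil =>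
      simp only [List.cons_append, List.nil_append]
      rw [pvStreaks]
      cases hrest : rest with
      | nil => simp [pvStreaks]
      | cons y u =>
        obtain ⟨s1, ss1, hs1, hh1⟩ := pvStreaks_first y u
        rw [hs1]
        dsimp only
        have : y ≠ x + 1 := by
          apply hgap y
          rw [hrest]
          rfl
        rw [hh1, if_neg (by simpa using this)]
    | cons y s'' =>
      rw [List.isChain_cons_cons] at hch
      have hlast : (x :: y :: s'').getLast? = (y :: s'').getLast? := List.getLast?_cons_cons
      have ihres := ih rest (by simp) hch.2 (by
        intro h' hh
        have hg := hgap h' hh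
        rw [hlast] at hg
        exact hg)
      simp only [List.cons_append] at ihres ⊢
      rw [pvStreaks, ihres]
      dsimp only
      have hhh : (y :: s'').head? = some (x + 1) := by rw [hch.1]; rfl
      rw [if_pos hhh]

lemma pvStreaks_decomp (ur : List Int) (h : ur ≠ []) :
    pvStreaks ur = pvCPre ur :: pvStreaks (ur.drop (pvCPre ur).length) := by
  have hne : pvCPre ur ≠ [] := by
    cases ur with
    | nil => simp at h
    | cons x u => exact pvCPre_ne_nil x u
  obtain ⟨e, he⟩ := Option.isSome_iff_exists.mp (Option.ne_none_iff_isSome.mp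
    (mt List.getLast?_eq_none_iff.mp hne))
  conv_lhs => rw [← pvCPre_append_drop ur]
  rw [streaks_append (pvCPre ur) _ hne (pvCPre_chain ur) (by
    intro h' hh
    rw [he]
    exact fun hc => (pvCPre_gap ur e h' he hh) (by simpa using hc))]

lemma pvFirstRun_skip (L : Nat) (s : List Int) : ∀ (rest : List Int), s ≠ [] →
    List.IsChain (fun a b => b = a + 1) s → (s ++ rest).Pairwise (· < ·) →
    (∀ h', rest.head? = some h' → h' ≠ s.getLast?.getD 0 + 1) →
    s.length < L → pvFirstRun L (s ++ rest) = pvFirstRun L rest := by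
  induction s with
  | nil => intro _ h; simp at h
  | cons x s' ih =>
    intro rest _ hch hpw hgap hlen
    by_cases hle : L ≤ ((x :: s') ++ rest).length
    · have hrest : rest ≠ [] := by
        intro hr
        rw [hr] at hle
        simp at hle hlen
        omega
      have hcond : ¬ (PySem.List.pyGetD (((x :: s') ++ rest).take L) (-1) 0
          - PySem.List.pyGetD (((x :: s') ++ rest).take L) 0 0 = (L : Int) - 1) := by
        intro hc
        set w := ((x :: s') ++ rest).take L with hw
        have hwlen : w.length = L := by
          rw [hw, List.length_take]
          omega
        have hwne : w ≠ [] := by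
          intro hwnil
          rw [hwnil] at hwlen
          simp at hwlen
          omega
        have hwhead : w.head? = some x := by
          rw [hw, List.head?_take, if_neg (by omega)]
          rfl
        have hwpw : w.Pairwise (· < ·) := List.Pairwise.sublist (List.take_sublist _ _) hpw
        -- w is a chain
        have hchain : List.IsChain (fun a b => b = a + 1) w := by
          cases hwc : w with
          | nil => exact absurd hwc hwne
          | cons x' t' =>
            have hx' : x' = x := by rw [hwc] at hwhead; simpa using hwhead
            subst hx'
            have hlast : (x' :: t').getLast?.getD 0 = x' + (t'.length : Int) := by
              rw [pyGetD_neg_one' _ _ hwne, pyGetD_zero' _ _ hwne, hwc] at hc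
              simp only [List.head?_cons, Option.getD_some] at hc
              have htl : (t'.length : Int) = (L : Int) - 1 := by
                have hwl := hwlen
                rw [hwc] at hwl
                simp at hwl
                omega
              omega
            rw [hwc] at hwpw
            exact chain_of_last t' x' hwpw hlast
        -- but w crosses the gap between s and rest
        have hsplit : w = (x :: s') ++ rest.take (L - (x :: s').length) := by
          rw [hw, List.take_append, List.take_of_length_le (by omega)]
        obtain ⟨h', hh'⟩ := Option.isSome_iff_exists.mp (Option.ne_none_iff_isSome.mp
          (mt List.head?_eq_none_iff.mp hrest))
        have hhead_take : (rest.take (L - (x :: s').length)).head? = some h' := by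
          rw [List.head?_take, if_neg (by omega)]
          exact hh'
        obtain ⟨e, he⟩ := Option.isSome_iff_exists.mp (Option.ne_none_iff_isSome.mp
          (mt List.getLast?_eq_none_iff.mp (show (x :: s') ≠ [] by simp)))
        rw [hsplit, List.isChain_append] at hchain
        have := hchain.2.2 e (by rw [he]; rfl) h' (by rw [hhead_take]; rfl)
        apply hgap h' hh'
        rw [he]
        simpa using this
      rw [show (x :: s') ++ rest = x :: (s' ++ rest) from rfl] at hle hcond ⊢
      rw [pvFirstRun_unfold L (x :: (s' ++ rest)) (by simp), if_pos hle, if_neg hcond]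
      simp only [List.tail_cons]
      cases s' with
      | nil => simp
      | cons y s'' =>
        apply ih rest (by simp) (List.IsChain.tail hch)
          (by rw [show (x :: y :: s'') ++ rest = x :: ((y :: s'') ++ rest) from rfl] at hpw
              exact List.Pairwise.of_cons hpw)
          (by intro h' hh
              have hg := hgap h' hh
              rw [List.getLast?_cons_cons] at hg
              exact hg)
          (by simp at hlen ⊢; omega)
    · rw [pvFirstRun_unfold L _ (by simp), if_neg hle]
      rw [pvFirstRun_none_of_lt L rest (by simp at hle; omega)]

lemma firstRun_streaks (L : Nat) (hL : 1 ≤ L) : ∀ (n : Nat) (ur : List Int), ur.length ≤ n →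
    ur.Pairwise (· < ·) →
    pvFirstRun L ur = ((pvStreaks ur).find?
      (fun s => decide ((L : Int) ≤ (s.length : Int)))).map (fun s => s.take L) := by
  intro n
  induction n with
  | zero =>
    intro ur hlen _
    have h0 : ur = [] := List.length_eq_zero_iff.mp (by omega)
    subst h0
    rfl
  | succ n ih =>
    intro ur hlen hpw
    cases hur : ur with
    | nil => rfl
    | cons x u =>
    rw [← hur]
    have hne : ur ≠ [] := by rw [hur]; simp
    have hcne : pvCPre ur ≠ [] := by rw [hur]; exact pvCPre_ne_nil x u
    have hsplit := pvCPre_append_drop ur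
    rw [pvStreaks_decomp ur hne, List.find?_cons]
    by_cases hP : L ≤ (pvCPre ur).length
    · have hdec : (decide ((L : Int) ≤ ((pvCPre ur).length : Int))) = true := by
        simp
        exact_mod_cast hP
      rw [hdec]
      dsimp only
      have hLur : L ≤ ur.length := by
        conv_rhs => rw [← hsplit]
        rw [List.length_append]
        omega
      have htake : ur.take L = (pvCPre ur).take L := by
        conv_lhs => rw [← hsplit]
        rw [List.take_append_of_le_length hP]
      have hchain : List.IsChain (fun a b => b = a + 1) (ur.take L) := by
        rw [htake]
        exact (pvCPre_chain ur).take L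
      have hwlen : (ur.take L).length = L := by
        rw [List.length_take]
        omega
      have hwhead : (ur.take L).head? = some x := by
        rw [List.head?_take, if_neg (by omega), hur]
        rfl
      have hcond : PySem.List.pyGetD (ur.take L) (-1) 0
          - PySem.List.pyGetD (ur.take L) 0 0 = (L : Int) - 1 := by
        have hwne : ur.take L ≠ [] := by
          intro hc
          rw [hc] at hwlen
          simp at hwlen
          omega
        rw [pyGetD_neg_one' _ _ hwne, pyGetD_zero' _ _ hwne]
        cases hwc : ur.take L with
        | nil => exact absurd hwc hwne
        | cons x' t' =>
          have hx' : x' = x := by rw [hwc] at hwhead; simpa using hwhead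
          have hch' : List.IsChain (fun a b => b = a + 1) (x' :: t') := by rw [← hwc]; exact hchain
          rw [chain_last t' x' hch']
          have : t'.length = L - 1 := by
            have := hwlen
            rw [hwc] at this
            simp at this
            omega
          rw [this]
          simp only [List.head?_cons, Option.getD_some]
          push_cast
          omega
      rw [pvFirstRun_unfold L ur hne, if_pos hLur, if_pos hcond, htake]
      rfl
    · have hdec : (decide ((L : Int) ≤ ((pvCPre ur).length : Int))) = false := by
        simp
        omega
      rw [hdec]
      dsimp only
      have hskip : pvFirstRun L ur = pvFirstRun L (ur.drop (pvCPre ur).length) := by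
        conv_lhs => rw [← hsplit]
        obtain ⟨e, he⟩ := Option.isSome_iff_exists.mp (Option.ne_none_iff_isSome.mp
          (mt List.getLast?_eq_none_iff.mp hcne))
        apply pvFirstRun_skip L (pvCPre ur) _ hcne (pvCPre_chain ur)
          (by rw [hsplit]; exact hpw)
          (by intro h' hh
              rw [he]
              exact fun hc => (pvCPre_gap ur e h' he hh) (by simpa using hc))
          (by omega)
      rw [hskip]
      apply ih
      · have h1 : 1 ≤ (pvCPre ur).length := by
          cases hc : pvCPre ur with
          | nil => exact absurd hc hcne
          | cons a b => simp
        rw [List.length_drop]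
        omega
      · conv at hpw => rw [← hsplit]
        exact (List.pairwise_append.mp hpw).2.1

lemma foldl_freeze_stay (l : List Int) (c : Int → Prop) [DecidablePred c] (v : Int → Int)
    (r : Int) (hr : r ≠ 0) :
    l.foldl (fun rp i => if rp ≠ 0 then rp else if c i then v i else rp) r = r := by
  induction l with
  | nil => rfl
  | cons i t ih => rw [List.foldl_cons, if_pos hr]; exact ih

lemma foldl_freeze_find (l : List Int) (c : Int → Prop) [DecidablePred c] (v : Int → Int)
    (hv : ∀ i ∈ l, c i → v i ≠ 0) :
    l.foldl (fun rp i => if rp ≠ 0 then rp else if c i then v i else rp) 0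
    = match l.find? (fun i => decide (c i)) with
      | some i => v i
      | none => 0 := by
  induction l with
  | nil => rfl
  | cons i t ih =>
    rw [List.foldl_cons, if_neg (by omega), List.find?_cons]
    by_cases hc : c i
    · rw [if_pos hc, show decide (c i) = true from decide_eq_true hc]
      dsimp only
      exact foldl_freeze_stay t c v _ (hv i (by simp) hc)
    · rw [if_neg hc, show decide (c i) = false from decide_eq_false hc]
      dsimp only
      exact ih (fun j hj => hv j (by simp [hj]))

lemma slice_shift (x : Int) (rest : List Int) (k L : Nat) :
    PySem.List.slice (x :: rest) (some (1 + (k : Int))) (some (1 + (k : Int) + (L : Int)))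
      = PySem.List.slice rest (some ((0 : Int) + (k : Int))) (some ((0 : Int) + (k : Int) + (L : Int))) := by
  rw [PySem.List.slice_toNat, PySem.List.slice_toNat]
  · have h1 : ((1 : Int) + (k : Int)).toNat = k + 1 := by omega
    have h2 : ((1 : Int) + (k : Int) + (L : Int)).toNat = k + 1 + L := by omega
    have h3 : ((0 : Int) + (k : Int)).toNat = k := by omega
    have h4 : ((0 : Int) + (k : Int) + (L : Int)).toNat = k + L := by omega
    rw [h1, h2, h3, h4]
    rw [show List.drop (k + 1) (x :: rest) = List.drop k rest from by simp [List.drop_succ_cons]]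
    congr 1
    omega
  all_goals omega

lemma find_map_helper (c c' : Int → Bool) (g g' : Int → List Int) (l : List Nat) (f f' : Nat → Int)
    (h : ∀ k ∈ l, c (f k) = c' (f' k) ∧ g (f k) = g' (f' k)) :
    ((l.map f).find? c).map g = ((l.map f').find? c').map g' := by
  induction l with
  | nil => rfl
  | cons k t ih =>
    rw [List.map_cons, List.map_cons, List.find?_cons, List.find?_cons]
    obtain ⟨hc, hg⟩ := h k (by simp)
    by_cases hck : c (f k) = true
    · rw [show c (f k) = true from hck, show c' (f' k) = true from by rw [← hc]; exact hck]
      dsimp only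
      rw [Option.map_some, Option.map_some, hg]
    · rw [show c (f k) = false from eq_false_of_ne_true hck,
          show c' (f' k) = false from by rw [← hc]; exact eq_false_of_ne_true hck]
      dsimp only
      exact ih (fun j hj => h j (by simp [hj]))

lemma find_window (L : Nat) (hL : 1 ≤ L) : ∀ (ur : List Int),
    ((PySem.List.pyRange 0 ((ur.length : Int) - (L : Int) + 1) 1).find?
        (fun i => decide (PySem.List.pyGetD (PySem.List.slice ur (some i) (some (i + (L : Int)))) (-1) 0
          - PySem.List.pyGetD (PySem.List.slice ur (some i) (some (i + (L : Int)))) 0 0 = (L : Int) - 1))).map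
      (fun i => PySem.List.slice ur (some i) (some (i + (L : Int))))
    = pvFirstRun L ur := by
  intro ur
  induction ur with
  | nil =>
    rw [PySem.List.pyRange_one_eq_nil (by simp; omega)]
    rfl
  | cons x rest ih =>
    by_cases hle : L ≤ (x :: rest).length
    · have hslice0 : PySem.List.slice (x :: rest) (some 0) (some (0 + (L : Int)))
          = (x :: rest).take L := by
        rw [zero_add, PySem.List.slice_zero_start, PySem.List.slice_to]
        · simp
        · omega
      rw [PySem.List.pyRange_one_cons (by
          have h := hle
          simp only [List.length_cons] at h ⊢
          push_cast
          omega),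
        List.find?_cons]
      by_cases hc0 : (PySem.List.pyGetD (PySem.List.slice (x :: rest) (some 0) (some (0 + (L : Int)))) (-1) 0
          - PySem.List.pyGetD (PySem.List.slice (x :: rest) (some 0) (some (0 + (L : Int)))) 0 0 = (L : Int) - 1)
      · rw [show decide (PySem.List.pyGetD (PySem.List.slice (x :: rest) (some 0) (some (0 + (L : Int)))) (-1) 0
              - PySem.List.pyGetD (PySem.List.slice (x :: rest) (some 0) (some (0 + (L : Int)))) 0 0 = (L : Int) - 1) = true
            from decide_eq_true hc0]
        dsimp only
        rw [Option.map_some]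
        rw [hslice0] at hc0 ⊢
        rw [pvFirstRun_unfold L _ (by simp), if_pos hle, if_pos hc0]
      · rw [show decide (PySem.List.pyGetD (PySem.List.slice (x :: rest) (some 0) (some (0 + (L : Int)))) (-1) 0
              - PySem.List.pyGetD (PySem.List.slice (x :: rest) (some 0) (some (0 + (L : Int)))) 0 0 = (L : Int) - 1) = false
            from decide_eq_false hc0]
        dsimp only
        rw [hslice0] at hc0
        rw [pvFirstRun_unfold L _ (by simp), if_pos hle, if_neg hc0]
        simp only [List.tail_cons]
        rw [← ih]
        rw [show (0 : Int) + 1 = 1 from rfl]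
        rw [PySem.List.pyRange_one 1, PySem.List.pyRange_one 0]
        have hrange : ((((x :: rest).length : Int) - (L : Int) + 1) - 1).toNat
            = (((rest.length : Int) - (L : Int) + 1) - 0).toNat := by
          simp only [List.length_cons]
          push_cast
          omega
        rw [hrange]
        apply find_map_helper
        intro k _
        constructor
        · rw [slice_shift]
        · funext
          rw [slice_shift]
    · rw [PySem.List.pyRange_one_eq_nil (by
        have h := hle
        simp only [List.length_cons] at h ⊢
        push_cast
        omega)]
      rw [pvFirstRun_unfold L _ (by simp), if_neg hle]
      rfl

lemma pvStreaks_flatten (l : List Int) : (pvStreaks l).flatten = l := by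
  induction l with
  | nil => rfl
  | cons r rest ih =>
    rw [pvStreaks]
    cases hr : pvStreaks rest with
    | nil =>
      rw [hr] at ih
      simp at ih
      simp [ih]
    | cons s ss =>
      rw [hr] at ih
      dsimp only
      by_cases hc : s.head? = some (r + 1)
      · rw [if_pos hc]
        simp only [List.flatten_cons] at ih ⊢
        rw [List.cons_append, ih]
      · rw [if_neg hc]
        simp only [List.flatten_cons] at ih ⊢
        rw [ih]
        rfl

lemma foldl_max_le_iff (ss : List (List Int)) : ∀ (b L : Int),
    L ≤ ss.foldl (fun b s => max b (s.length : Int)) b ↔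
      (L ≤ b ∨ ∃ s ∈ ss, L ≤ (s.length : Int)) := by
  induction ss with
  | nil => intro b L; simp
  | cons s t ih =>
    intro b L
    rw [List.foldl_cons, ih]
    rw [le_max_iff]
    constructor
    · rintro ((h | h) | h)
      · exact Or.inl h
      · exact Or.inr ⟨s, by simp, h⟩
      · obtain ⟨s', hs', hl⟩ := h
        exact Or.inr ⟨s', by simp [hs'], hl⟩
    · rintro (h | ⟨s', hs', hl⟩)
      · exact Or.inl (Or.inl h)
      · rcases List.mem_cons.mp hs' with h | h
        · exact Or.inl (Or.inr (h ▸ hl))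
        · exact Or.inr ⟨s', h, hl⟩

lemma prod_count_pos (ranks w : List Int) : ∀ (a : Int), 0 < a →
    (∀ r ∈ w, 0 < (ranks.count r : Int)) →
    0 < w.foldl (fun m r => m * (ranks.count r : Int)) a := by
  induction w with
  | nil => intro a ha _; exact ha
  | cons r t ih =>
    intro a ha hc
    rw [List.foldl_cons]
    exact ih _ (mul_pos ha (hc r (by simp))) (fun r' hr' => hc r' (by simp [hr']))

lemma inner_to_streaks (ur ranks : List Int) (L : Int) (hL : 1 ≤ L)
    (hso : ur.Pairwise (· < ·)) (hcnt : ∀ r ∈ ur, 0 < (ranks.count r : Int)) :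
    (PySem.List.pyRange 0 ((ur.length : Int) - L + 1) 1).foldl (fun rp i =>
      if rp ≠ 0 then rp else
        let sub := PySem.List.slice ur (some i) (some (i + L))
        if PySem.List.pyGetD sub (-1) 0 - PySem.List.pyGetD sub 0 0 = L - 1 then
          L * sub.foldl (fun mult r => mult * (ranks.count r : Int)) 1
        else rp) 0
    = match (pvStreaks ur).find? (fun s => decide (L ≤ (s.length : Int))) with
      | some s => L * ((s.take L.toNat).foldl (fun mult r => mult * (ranks.count r : Int)) 1)
      | none => 0 := by
  have hcast : ((L.toNat : Nat) : Int) = L := Int.toNat_of_nonneg (by omega)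
  have hvpos : ∀ (w : List Int), (∀ r ∈ w, r ∈ ur) →
      L * w.foldl (fun m r => m * (ranks.count r : Int)) 1 ≠ 0 := by
    intro w hw
    have := prod_count_pos ranks w 1 one_pos (fun r hr => hcnt r (hw r hr))
    positivity
  rw [foldl_freeze_find _
    (fun i => PySem.List.pyGetD (PySem.List.slice ur (some i) (some (i + L))) (-1) 0
      - PySem.List.pyGetD (PySem.List.slice ur (some i) (some (i + L))) 0 0 = L - 1)
    (fun i => L * (PySem.List.slice ur (some i) (some (i + L))).foldl
      (fun mult r => mult * (ranks.count r : Int)) 1)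
    (by
      intro i _ _
      exact hvpos _ (fun r hr => PySem.List.mem_of_mem_slice ur _ _ hr))]
  have hfw := find_window L.toNat (by omega) ur
  rw [hcast] at hfw
  have hfs := firstRun_streaks L.toNat (by omega) ur.length ur (le_refl _) hso
  rw [hcast] at hfs
  rw [hfs] at hfw
  -- hfw : (find? over range).map slice = (find? over streaks).map (take L.toNat)
  cases hr : (PySem.List.pyRange 0 ((ur.length : Int) - L + 1) 1).find?
      (fun i => decide (PySem.List.pyGetD (PySem.List.slice ur (some i) (some (i + L))) (-1) 0
        - PySem.List.pyGetD (PySem.List.slice ur (some i) (some (i + L))) 0 0 = L - 1)) with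
  | none =>
    rw [hr] at hfw
    cases hs : (pvStreaks ur).find? (fun s => decide (L ≤ (s.length : Int))) with
    | none => rfl
    | some s => rw [hs] at hfw; simp at hfw
  | some i =>
    rw [hr] at hfw
    cases hs : (pvStreaks ur).find? (fun s => decide (L ≤ (s.length : Int))) with
    | none => rw [hs] at hfw; simp at hfw
    | some s =>
      rw [hs] at hfw
      simp only [Option.map_some, Option.some.injEq] at hfw
      dsimp only
      rw [hfw]

lemma stageRuns (ur ranks : List Int) (pts : Int) (hso : ur.Pairwise (· < ·))
    (hcnt : ∀ r ∈ ur, 0 < (ranks.count r : Int)) :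
    pts + (PySem.List.pyRange 5 2 (-1)).foldl (fun rp length =>
      if rp > 0 then rp else
        (PySem.List.pyRange 0 ((ur.length : Int) - length + 1) 1).foldl (fun rp i =>
          if rp ≠ 0 then rp else
            let sub := PySem.List.slice ur (some i) (some (i + length))
            if PySem.List.pyGetD sub (-1) 0 - PySem.List.pyGetD sub 0 0 = length - 1 then
              length * sub.foldl (fun mult r => mult * (ranks.count r : Int)) 1
            else rp) rp) 0
    = (let ss := pvStreaks ur
       let best := ss.foldl (fun best s => max best (s.length : Int)) 0
       let run_len := min best 5
       if 3 ≤ run_len then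
         let streak := (ss.find? (fun s => decide (run_len ≤ (s.length : Int)))).getD []
         let mult := (PySem.List.slice streak none (some run_len)).foldl
           (fun mult r => mult * ((PySem.Dict.counter ranks).getD r 0)) 1
         pts + run_len * mult
       else pts) := by
  have hmemur : ∀ (s : List Int), s ∈ pvStreaks ur → ∀ r ∈ s, r ∈ ur := by
    intro s hs r hr
    rw [← pvStreaks_flatten ur]
    exact List.mem_flatten.mpr ⟨s, hs, hr⟩
  have hpos : ∀ (L : Int) (s : List Int), 0 < L → s ∈ pvStreaks ur →
      0 < L * ((s.take L.toNat).foldl (fun mult r => mult * (ranks.count r : Int)) 1) := by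
    intro L s hL hs
    exact mul_pos hL (prod_count_pos ranks _ 1 one_pos
      (fun r hr => hcnt r (hmemur s hs r (List.mem_of_mem_take hr))))
  rw [show PySem.List.pyRange 5 2 (-1) = [5, 4, 3] from by decide]
  simp only [List.foldl_cons, List.foldl_nil]
  rw [if_neg (show ¬((0 : Int) > 0) from by omega)]
  rw [inner_to_streaks ur ranks 5 (by omega) hso hcnt]
  by_cases e5 : ∃ s ∈ pvStreaks ur, (5 : Int) ≤ (s.length : Int)
  · have hb5 : (5 : Int) ≤ (pvStreaks ur).foldl (fun best s => max best (s.length : Int)) 0 :=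
      (foldl_max_le_iff _ 0 5).mpr (Or.inr e5)
    have hmin : min ((pvStreaks ur).foldl (fun best s => max best (s.length : Int)) 0) 5 = 5 :=
      min_eq_right hb5
    cases hf : (pvStreaks ur).find? (fun s => decide ((5 : Int) ≤ (s.length : Int))) with
    | none =>
      exfalso
      obtain ⟨s, hs, hl⟩ := e5
      exact absurd (List.find?_eq_none.mp hf s hs) (by simp [hl])
    | some s5 =>
      have hs5 := List.mem_of_find?_eq_some hf
      have hp5 := hpos 5 s5 (by omega) hs5
      rw [if_pos hp5, if_pos hp5]
      simp only [hmin, hf]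
      rw [if_pos (show (3 : Int) ≤ 5 from by omega)]
      simp only [Option.getD_some, PySem.Dict.getD_counter]
      rw [PySem.List.slice_to]
      omega
  · have hn5 : (pvStreaks ur).find? (fun s => decide ((5 : Int) ≤ (s.length : Int))) = none := by
      rw [List.find?_eq_none]
      intro s hs
      simp only [decide_eq_true_eq]
      exact fun hl => e5 ⟨s, hs, hl⟩
    have hbn5 : ¬ (5 : Int) ≤ (pvStreaks ur).foldl (fun best s => max best (s.length : Int)) 0 := by
      intro h
      rcases (foldl_max_le_iff _ 0 5).mp h with h | h
      · omega
      · exact e5 h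
    simp only [hn5]
    rw [if_neg (show ¬((0 : Int) > 0) from by omega)]
    rw [inner_to_streaks ur ranks 4 (by omega) hso hcnt]
    by_cases e4 : ∃ s ∈ pvStreaks ur, (4 : Int) ≤ (s.length : Int)
    · have hb4 : (4 : Int) ≤ (pvStreaks ur).foldl (fun best s => max best (s.length : Int)) 0 :=
        (foldl_max_le_iff _ 0 4).mpr (Or.inr e4)
      have hmin : min ((pvStreaks ur).foldl (fun best s => max best (s.length : Int)) 0) 5 = 4 := by
        omega
      cases hf : (pvStreaks ur).find? (fun s => decide ((4 : Int) ≤ (s.length : Int))) with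
      | none =>
        exfalso
        obtain ⟨s, hs, hl⟩ := e4
        exact absurd (List.find?_eq_none.mp hf s hs) (by simp [hl])
      | some s4 =>
        have hs4 := List.mem_of_find?_eq_some hf
        have hp4 := hpos 4 s4 (by omega) hs4
        rw [if_pos hp4]
        simp only [hmin, hf]
        rw [if_pos (show (3 : Int) ≤ 4 from by omega)]
        simp only [Option.getD_some, PySem.Dict.getD_counter]
        rw [PySem.List.slice_to]
        omega
    · have hn4 : (pvStreaks ur).find? (fun s => decide ((4 : Int) ≤ (s.length : Int))) = none := by
        rw [List.find?_eq_none]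
        intro s hs
        simp only [decide_eq_true_eq]
        exact fun hl => e4 ⟨s, hs, hl⟩
      have hbn4 : ¬ (4 : Int) ≤ (pvStreaks ur).foldl (fun best s => max best (s.length : Int)) 0 := by
        intro h
        rcases (foldl_max_le_iff _ 0 4).mp h with h | h
        · omega
        · exact e4 h
      simp only [hn4]
      rw [if_neg (show ¬((0 : Int) > 0) from by omega)]
      rw [inner_to_streaks ur ranks 3 (by omega) hso hcnt]
      by_cases e3 : ∃ s ∈ pvStreaks ur, (3 : Int) ≤ (s.length : Int)
      · have hb3 : (3 : Int) ≤ (pvStreaks ur).foldl (fun best s => max best (s.length : Int)) 0 :=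
          (foldl_max_le_iff _ 0 3).mpr (Or.inr e3)
        have hmin : min ((pvStreaks ur).foldl (fun best s => max best (s.length : Int)) 0) 5 = 3 := by
          omega
        cases hf : (pvStreaks ur).find? (fun s => decide ((3 : Int) ≤ (s.length : Int))) with
        | none =>
          exfalso
          obtain ⟨s, hs, hl⟩ := e3
          exact absurd (List.find?_eq_none.mp hf s hs) (by simp [hl])
        | some s3 =>
          simp only [hmin, hf]
          rw [if_pos (show (3 : Int) ≤ 3 from by omega)]
          simp only [Option.getD_some, PySem.Dict.getD_counter]
          rw [PySem.List.slice_to]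
          omega
      · have hn3 : (pvStreaks ur).find? (fun s => decide ((3 : Int) ≤ (s.length : Int))) = none := by
          rw [List.find?_eq_none]
          intro s hs
          simp only [decide_eq_true_eq]
          exact fun hl => e3 ⟨s, hs, hl⟩
        have hbn3 : ¬ (3 : Int) ≤ (pvStreaks ur).foldl (fun best s => max best (s.length : Int)) 0 := by
          intro h
          rcases (foldl_max_le_iff _ 0 3).mp h with h | h
          · omega
          · exact e3 h
        have hmin : min ((pvStreaks ur).foldl (fun best s => max best (s.length : Int)) 0) 5
            = (pvStreaks ur).foldl (fun best s => max best (s.length : Int)) 0 := by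
          omega
        simp only [hn3, hmin]
        rw [if_neg hbn3]
        omega

lemma foldl_add_const (a : String) (l : List String) (h : ∀ x ∈ l, x = a) :
    l.foldl PySem.Set.add [a] = [a] := by
  induction l with
  | nil => rfl
  | cons x t ih =>
    have hx : x = a := h x (by simp)
    subst hx
    rw [List.foldl_cons, show PySem.Set.add [x] x = [x] from by simp [PySem.Set.add, PySem.Set.contains]]
    exact ih (fun y hy => h y (by simp [hy]))

lemma set_singleton (a : String) (l : List String) (h : ∀ x ∈ l, x = a) :
    PySem.Set.ofList (a :: l) = [a] := by
  rw [PySem.Set.ofList_eq_foldl, List.foldl_cons]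
  rw [show PySem.Set.add [] a = [a] from rfl]
  exact foldl_add_const a l h

lemma stageFlush (kept : List (Int × String)) (cut : Int × String) (is_crib : Bool) (pts : Int) :
    (if kept.length = 4 then
      let kept_suits := PySem.Set.ofList (kept.map (fun c => c.2))
      if kept_suits.length = 1 then
        if PySem.List.pyGetD kept_suits 0 "" = cut.2 then pts + 5
        else if !is_crib then pts + 4 else pts
      else pts
    else pts)
    = (match kept with
      | [] => pts
      | c0 :: _ =>
        if kept.length = 4 ∧ kept.all (fun c => decide (c.2 = c0.2)) then
          if c0.2 = cut.2 then pts + 5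
          else if !is_crib then pts + 4 else pts
        else pts) := by
  cases kept with
  | nil => simp
  | cons c0 rest =>
    simp only []
    by_cases h4 : (c0 :: rest).length = 4
    · rw [if_pos h4]
      by_cases hall : ∀ x ∈ rest, x.2 = c0.2
      · have hs : PySem.Set.ofList ((c0 :: rest).map (fun c => c.2)) = [c0.2] := by
          rw [List.map_cons]
          exact set_singleton _ _ (by intro x hx; obtain ⟨c, hc, rfl⟩ := List.mem_map.mp hx; exact hall c hc)
        simp only [hs]
        have hb : ((c0 :: rest).all (fun c => decide (c.2 = c0.2))) = true :=
          List.all_eq_true.mpr (fun c hc => decide_eq_true (by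
            rcases List.mem_cons.mp hc with h | h
            · rw [h]
            · exact hall c h))
        rw [if_pos (show ([c0.2].length = 1) from rfl)]
        rw [show PySem.List.pyGetD [c0.2] 0 "" = c0.2 from rfl]
        have hcond : (c0 :: rest).length = 4 ∧ ((c0 :: rest).all fun c => decide (c.2 = c0.2)) = true := ⟨h4, hb⟩
        rw [if_pos hcond]
      · push_neg at hall
        obtain ⟨x, hx, hne⟩ := hall
        have hb : ((c0 :: rest).all (fun c => decide (c.2 = c0.2))) = false :=
          List.all_eq_false.mpr ⟨x, List.mem_cons_of_mem _ hx, by simpa using hne⟩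
        have hlen : (PySem.Set.ofList ((c0 :: rest).map (fun c => c.2))).length ≠ 1 := by
          intro h1
          obtain ⟨y, hy⟩ := List.length_eq_one_iff.mp h1
          have hm1 : c0.2 ∈ PySem.Set.ofList ((c0 :: rest).map (fun c => c.2)) := by
            rw [PySem.Set.mem_ofList]; simp
          have hm2 : x.2 ∈ PySem.Set.ofList ((c0 :: rest).map (fun c => c.2)) := by
            rw [PySem.Set.mem_ofList]
            exact List.mem_map.mpr ⟨x, List.mem_cons_of_mem _ hx, rfl⟩
          rw [hy] at hm1 hm2
          simp at hm1 hm2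
          exact hne (hm2.trans hm1.symm)
        simp only [if_neg hlen]
        rw [if_neg (fun hc => by rw [hb] at hc; exact Bool.false_ne_true hc.2)]
    · rw [if_neg h4]
      rw [if_neg (fun hc => h4 hc.1)]

lemma stageNobs (kept : List (Int × String)) (cut : Int × String) (pts : Int) :
    kept.foldl (fun pts c => if c.1 = 11 ∧ c.2 = cut.2 then pts + 1 else pts) pts
    = pts + (kept.countP (fun c => decide (c.1 = 11 ∧ c.2 = cut.2)) : Int) := by
  induction kept generalizing pts with
  | nil => simp
  | cons c t ih => by_cases h : c.1 = 11 ∧ c.2 = cut.2 <;> simp [h, ih] <;> push_cast <;> ring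

-- ===== VERDICT (by name: the statement is the Claim_ definition above) =====
theorem score_engine_spec : Claim_equal_score_engine := by
  intro kept cut is_crib _
  unfold Spec_score_engine score_engine score_engine_alt
  simp only []
  have hlen : ((kept ++ [cut]).length : Int) + 1
      = ((((kept ++ [cut]).map (fun c => c.1)).map (fun r => min r 10)).length : Int) + 1 := by
    simp
  rw [hlen, stage15 _ (by intro v hv; simp only [List.mem_map] at hv; obtain ⟨r, _, rfl⟩ := hv; exact min_le_right _ _),
      stagePairsA, stagePairsB]
  simp only []
  rw [stageRuns _ _ _ (PySem.List.sorted_ofList_pairwise_lt _) (by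
        intro r hr
        rw [PySem.List.mem_sorted] at hr
        rw [PySem.Set.mem_ofList] at hr
        exact_mod_cast List.count_pos_iff.mpr hr),
      stageFlush kept cut is_crib, stageNobs]
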